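-- pv_equiv track=rewrite | github.com/geyaokai/F-LMM | scripts/demo/interact.py | _find_first_span_ci
-- ===== SOURCE A (Python) =====
-- from typing import Any, Dict, List, Optional, Sequence, Tuple
--
-- def _find_first_span_ci(
--     text: str, needle: str, occurrence: int = 0
-- ) -> Optional[Tuple[int, int]]:
--     if not text or not needle:
--         return None
--     hay = text.lower()
--     ndl = needle.lower().strip()
--     if not ndl:
--         return None
--     start = 0
--     for _ in range(max(occurrence, 0) + 1):
--         pos = hay.find(ndl, start)
--         if pos == -1:
--             return None
--         start = pos + len(ndl)
--     return pos, pos + len(needle)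
-- ===== SOURCE B (Python) =====
-- def _find_first_span_ci(text, needle, occurrence=0):
--     # Alternative: scan once, collecting ALL non-overlapping case-insensitive
--     # match starts, then index into that list (instead of early-stopping finds).
--     if not text or not needle:
--         return None
--     hay = text.lower()
--     ndl = needle.lower().strip()
--     if not ndl:
--         return None
--     starts = []
--     i = 0
--     n = len(ndl)
--     while i <= len(hay):
--         if hay.startswith(ndl, i):
--             starts.append(i)
--             i += n
--         else:
--             i += 1
--     k = max(occurrence, 0)
--     if k < len(starts):
--         return (starts[k], starts[k] + len(needle))
--     return None
-- ===== Notes on version B (the rewrite author's own statement) =====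
-- stated objective: alternative
-- what changed: Replaces the early-stopping repeated str.find loop with a single left-to-right scan that collects all non-overlapping match starts into a list and then indexes it with max(occurrence,0).
import Mathlib
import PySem

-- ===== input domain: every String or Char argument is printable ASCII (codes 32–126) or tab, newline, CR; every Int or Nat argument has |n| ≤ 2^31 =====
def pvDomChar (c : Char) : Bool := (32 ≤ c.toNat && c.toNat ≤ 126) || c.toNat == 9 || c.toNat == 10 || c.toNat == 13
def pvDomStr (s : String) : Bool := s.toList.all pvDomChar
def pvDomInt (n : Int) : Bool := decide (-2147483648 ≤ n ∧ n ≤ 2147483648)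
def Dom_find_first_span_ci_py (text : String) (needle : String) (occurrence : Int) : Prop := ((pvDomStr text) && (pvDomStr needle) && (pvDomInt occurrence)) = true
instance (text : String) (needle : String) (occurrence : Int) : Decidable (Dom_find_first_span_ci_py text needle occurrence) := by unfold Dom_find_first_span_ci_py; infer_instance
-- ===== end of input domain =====

-- B replaces A's early-stopping repeated str.find loop by one scan collecting all
-- non-overlapping match starts, then indexing that list (objective: alternative).

-- ===== PORT A =====
-- A's 'for _ in range(max(occurrence,0)+1)' loop: k is the number of REMAINING
-- iterations after the current one; each iteration does pos = hay.find(ndl, start).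
def pvLoopA (hay ndl : List Char) : Nat → Int → Option Int
  | 0, start =>
    let pos := PySem.Chars.findFrom hay ndl start
    if pos = -1 then none else some pos
  | Nat.succ k, start =>
    let pos := PySem.Chars.findFrom hay ndl start
    if pos = -1 then none else pvLoopA hay ndl k (pos + (ndl.length : Int))

def find_first_span_ci_py (text : String) (needle : String) (occurrence : Int) : Option (Int × Int) :=
  if text = "" ∨ needle = "" then none
  else
    let hay := PySem.Chars.lower text.toList
    let ndl := PySem.Chars.strip (PySem.Chars.lower needle.toList)
    if ndl = [] then none
    else
      match pvLoopA hay ndl (max occurrence 0).toNat 0 with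
      | none => none
      | some pos => some (pos, pos + (needle.toList.length : Int))

-- ===== PORT B =====
-- Source B's while loop over i, collecting all non-overlapping match starts.
-- ndl is passed decomposed as c :: rest (the guard ensures it is nonempty).
def pvScanB (c : Char) (rest : List Char) : List Char → Nat → List Nat
  | [], _ => []
  | x :: t, i =>
    if (c :: rest) <+: (x :: t) then
      i :: pvScanB c rest ((x :: t).drop (rest.length + 1)) (i + rest.length + 1)
    else
      pvScanB c rest t (i + 1)
termination_by s _ => s.length
decreasing_by
  · simp
  · simp

def find_first_span_ci_py_alt (text : String) (needle : String) (occurrence : Int) : Option (Int × Int) :=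
  if text = "" ∨ needle = "" then none
  else
    let hay := PySem.Chars.lower text.toList
    match PySem.Chars.strip (PySem.Chars.lower needle.toList) with
    | [] => none
    | c :: rest =>
      match (pvScanB c rest hay 0)[(max occurrence 0).toNat]? with
      | some p => some ((p : Int), (p : Int) + (needle.toList.length : Int))
      | none => none

-- ===== PRECONDITION & SPEC =====
def Spec_find_first_span_ci_py (text : String) (needle : String) (occurrence : Int) (out : Option (Int × Int)) : Prop := out = find_first_span_ci_py_alt text needle occurrence
instance (text : String) (needle : String) (occurrence : Int) (out : Option (Int × Int)) : Decidable (Spec_find_first_span_ci_py text needle occurrence out) := by unfold Spec_find_first_span_ci_py; infer_instance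

-- ===== CLAIM (what is proved, stated in full; the proofs are below) =====
def Claim_equal_find_first_span_ci_py : Prop := ∀ (text : String) (needle : String) (occurrence : Int), Dom_find_first_span_ci_py text needle occurrence → Spec_find_first_span_ci_py text needle occurrence (find_first_span_ci_py text needle occurrence)

-- ===== LEMMAS AND PROOFS =====

lemma pvScanB_eq_nil (c : Char) (rest : List Char) (s : List Char) (i : Nat)
    (h : ¬ (c :: rest) <:+: s) : pvScanB c rest s i = [] := by
  induction s, i using pvScanB.induct c rest with
  | case1 i => rw [pvScanB]
  | case2 x t i hpre ih =>
    exact absurd hpre.isInfix h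
  | case3 x t i hpre ih =>
    rw [pvScanB, if_neg hpre]
    exact ih (fun hin => h (List.infix_cons hin))

lemma pvScanB_shift (c : Char) (rest : List Char) (j : Nat) :
    ∀ (s : List Char) (i : Nat),
      (c :: rest) <+: s.drop j →
      (∀ t < j, ¬ (c :: rest) <+: s.drop t) →
      pvScanB c rest s i
        = (i + j) :: pvScanB c rest (s.drop (j + (rest.length + 1))) (i + j + (rest.length + 1)) := by
  induction j with
  | zero =>
    intro s i hpre _
    simp only [List.drop_zero] at hpre
    cases s with
    | nil => simp at hpre
    | cons x t =>
      rw [pvScanB, if_pos hpre]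
      simp [Nat.add_assoc]
  | succ j ih =>
    intro s i hpre hmin
    have hnotpre : ¬ (c :: rest) <+: s := by
      have := hmin 0 (Nat.succ_pos j); simpa using this
    cases s with
    | nil => simp at hpre
    | cons x t =>
      rw [pvScanB, if_neg hnotpre]
      have hpre' : (c :: rest) <+: t.drop j := by simpa using hpre
      have hmin' : ∀ u < j, ¬ (c :: rest) <+: t.drop u := by
        intro u hu
        have := hmin (u + 1) (by omega)
        simpa using this
      rw [ih t (i + 1) hpre' hmin']
      have e3 : (x :: t).drop (j + 1 + (rest.length + 1)) = t.drop (j + (rest.length + 1)) := by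
        have e : j + 1 + (rest.length + 1) = (j + (rest.length + 1)) + 1 := by omega
        rw [e, List.drop_succ_cons]
      rw [e3, show i + 1 + j = i + (j + 1) from by omega]

lemma pvLoopA_eq_pvScanB (hay : List Char) (c : Char) (rest : List Char) :
    ∀ (k i : Nat), i ≤ hay.length →
      pvLoopA hay (c :: rest) k (i : Int)
        = ((pvScanB c rest (hay.drop i) i)[k]?).map (fun p => (p : Int)) := by
  intro k
  induction k with
  | zero =>
    intro i hi
    rw [pvLoopA]
    rw [PySem.Chars.findFrom_natCast hay (c :: rest) i hi]
    by_cases hf : PySem.Chars.find (hay.drop i) (c :: rest) = -1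
    · rw [if_pos (by simp [hf]), pvScanB_eq_nil c rest _ i
        ((PySem.Chars.find_eq_neg_one_iff _ _).mp hf)]
      simp
    · have h0 : 0 ≤ PySem.Chars.find (hay.drop i) (c :: rest) := by
        have := PySem.Chars.neg_one_le_find (hay.drop i) (c :: rest); omega
      obtain ⟨hp, hm⟩ := PySem.Chars.find_spec h0
      rw [pvScanB_shift c rest (PySem.Chars.find (hay.drop i) (c :: rest)).toNat _ i hp hm]
      rw [if_neg (by omega)]
      simp
      omega
  | succ k ih =>
    intro i hi
    rw [pvLoopA]
    rw [PySem.Chars.findFrom_natCast hay (c :: rest) i hi]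
    by_cases hf : PySem.Chars.find (hay.drop i) (c :: rest) = -1
    · rw [if_pos (by simp [hf]), pvScanB_eq_nil c rest _ i
        ((PySem.Chars.find_eq_neg_one_iff _ _).mp hf)]
      simp
    · have h0 : 0 ≤ PySem.Chars.find (hay.drop i) (c :: rest) := by
        have := PySem.Chars.neg_one_le_find (hay.drop i) (c :: rest); omega
      obtain ⟨hp, hm⟩ := PySem.Chars.find_spec h0
      have hlen : i + (PySem.Chars.find (hay.drop i) (c :: rest)).toNat + (rest.length + 1) ≤ hay.length := by
        have h1 := hp.length_le
        simp only [List.length_drop, List.length_cons] at h1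
        omega
      rw [pvScanB_shift c rest (PySem.Chars.find (hay.drop i) (c :: rest)).toNat _ i hp hm, if_neg hf]
      have harg : (i : Int) + PySem.Chars.find (hay.drop i) (c :: rest) + ((c :: rest).length : Int)
          = ((i + (PySem.Chars.find (hay.drop i) (c :: rest)).toNat + (rest.length + 1) : Nat) : Int) := by
        simp only [List.length_cons]
        push_cast
        omega
      rw [harg, ih (i + (PySem.Chars.find (hay.drop i) (c :: rest)).toNat + (rest.length + 1)) hlen]
      rw [if_neg (show ¬((i : Int) + PySem.Chars.find (hay.drop i) (c :: rest) = -1) from by omega)]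
      simp only [List.getElem?_cons_succ, List.drop_drop, ← Nat.add_assoc]

-- ===== VERDICT (by name: the statement is the Claim_ definition above) =====
theorem find_first_span_ci_py_spec : Claim_equal_find_first_span_ci_py := by
  intro text needle occurrence _
  unfold Spec_find_first_span_ci_py find_first_span_ci_py find_first_span_ci_py_alt
  by_cases hempty : text = "" ∨ needle = ""
  · rw [if_pos hempty, if_pos hempty]
  · rw [if_neg hempty, if_neg hempty]
    cases hnd : PySem.Chars.strip (PySem.Chars.lower needle.toList) with
    | nil => simp
    | cons c rest =>
      rw [if_neg (by simp)]
      have hmain := pvLoopA_eq_pvScanB (PySem.Chars.lower text.toList) c rest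
        (max occurrence 0).toNat 0 (Nat.zero_le _)
      simp only [List.drop_zero, Nat.cast_zero] at hmain
      cases hx : (pvScanB c rest (PySem.Chars.lower text.toList) 0)[(max occurrence 0).toNat]? with
      | none => simp [hmain, hx]
      | some p => simp [hmain, hx]
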